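-- pv_equiv track=rewrite | github.com/hotteok00/Algorithm | 프로그래머스/2/138476. 귤 고르기/귤 고르기.py | solution
-- ===== SOURCE A (Python) =====
-- def solution(k, tangerine):
--     arr = {}
--     for i in tangerine:
--         if i not in arr:
--             arr[i] = 0
--         arr[i] += 1
--
--     arr = sorted(arr.items(), key=lambda item: item[1], reverse=True)
--
--     cnt = 0
--     tmp = 0
--     for i in arr:
--         tmp += i[1]
--         cnt += 1
--         if tmp >= k: break
--
--     return cnt
-- ===== SOURCE B (Python) =====
-- def solution(k, tangerine):
--     freq = {}
--     for t in tangerine: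
--         freq[t] = freq.get(t, 0) + 1
--     n = len(tangerine)
--     bucket = [0] * (n + 1)
--     for f in freq.values():
--         bucket[f] += 1
--     cnt = 0
--     tmp = 0
--     for f in range(n, 0, -1):
--         for _ in range(bucket[f]):
--             tmp += f
--             cnt += 1
--             if tmp >= k:
--                 return cnt
--     return cnt
-- ===== Notes on version B (the rewrite author's own statement) =====
-- stated objective: alternative
-- what changed: B replaces A's comparison sort of the (size, count) items by a counting-sort: it builds a frequency-indexed bucket table bucket[f] = number of sizes occurring exactly f times and walks f from n down to 1, accumulating until k is covered.
import Mathlib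
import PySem

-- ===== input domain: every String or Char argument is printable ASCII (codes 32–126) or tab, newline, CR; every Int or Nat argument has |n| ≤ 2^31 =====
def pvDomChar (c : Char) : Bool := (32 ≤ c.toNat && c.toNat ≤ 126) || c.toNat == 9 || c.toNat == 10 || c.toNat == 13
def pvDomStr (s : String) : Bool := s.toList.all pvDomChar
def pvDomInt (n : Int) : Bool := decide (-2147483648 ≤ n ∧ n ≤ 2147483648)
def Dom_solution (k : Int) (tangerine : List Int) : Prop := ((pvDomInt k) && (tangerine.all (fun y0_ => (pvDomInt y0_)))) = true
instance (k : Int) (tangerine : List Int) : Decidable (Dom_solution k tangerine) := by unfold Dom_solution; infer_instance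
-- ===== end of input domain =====

-- B replaces A's comparison sort of (size, count) items by a counting-sort walk over a
-- frequency-indexed bucket table; objective: alternative (O(n) table walk vs O(m log m) sort).

-- ===== PORT A =====
-- the counting loop: 'if i not in arr: arr[i] = 0' then 'arr[i] += 1'
def solA_build (tangerine : List Int) : PySem.Dict Int Int :=
  tangerine.foldl (fun arr i =>
    let arr := if arr.contains i then arr else arr.insert i 0
    arr.insert i (arr.getD i 0 + 1)) PySem.Dict.empty

-- the greedy loop with 'break'
def solA_loop (k : Int) : List (Int × Int) → Int → Int → Int
  | [], _, cnt => cnt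
  | i :: rest, tmp, cnt =>
      let tmp := tmp + i.2
      let cnt := cnt + 1
      if tmp ≥ k then cnt else solA_loop k rest tmp cnt

def solution (k : Int) (tangerine : List Int) : Int :=
  let arr := solA_build tangerine
  let arr := PySem.List.sorted arr.items (fun item => item.2) true
  solA_loop k arr 0 0

-- ===== PORT B =====
-- inner 'for _ in range(bucket[f])' loop; Sum.inr r = the early 'return cnt'
def solB_inner (k f : Int) : Nat → Int → Int → (Int × Int) ⊕ Int
  | 0, tmp, cnt => Sum.inl (tmp, cnt)
  | m + 1, tmp, cnt =>
      let tmp := tmp + f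
      let cnt := cnt + 1
      if tmp ≥ k then Sum.inr cnt else solB_inner k f m tmp cnt

-- outer 'for f in range(n, 0, -1)' loop ('bucket[f]' is always in range: 1 ≤ f ≤ n, so getD is exact)
def solB_outer (k : Int) (bucket : List Int) : List Int → Int → Int → Int
  | [], _, cnt => cnt
  | f :: fs, tmp, cnt =>
      match solB_inner k f (bucket.getD f.toNat 0).toNat tmp cnt with
      | Sum.inr r => r
      | Sum.inl (tmp, cnt) => solB_outer k bucket fs tmp cnt

def solution_alt (k : Int) (tangerine : List Int) : Int :=
  let freq := tangerine.foldl (fun d t => d.insert t (d.getD t 0 + 1)) PySem.Dict.empty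
  let n := tangerine.length
  let bucket := freq.values.foldl
    (fun (b : List Int) (f : Int) => b.set f.toNat (b.getD f.toNat 0 + 1)) (List.replicate (n + 1) (0 : Int))
  solB_outer k bucket (PySem.List.pyRange (n : Int) 0 (-1)) 0 0

-- ===== PRECONDITION & SPEC =====
def Spec_solution (k : Int) (tangerine : List Int) (out : Int) : Prop := out = solution_alt k tangerine
instance (k : Int) (tangerine : List Int) (out : Int) : Decidable (Spec_solution k tangerine out) := by unfold Spec_solution; infer_instance

-- ===== CLAIM (what is proved, stated in full; the proofs are below) =====
def Claim_equal_solution : Prop := ∀ (k : Int) (tangerine : List Int), Dom_solution k tangerine → Spec_solution k tangerine (solution k tangerine)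

-- ===== LEMMAS AND PROOFS =====

-- the greedy accumulate-until-k loop, abstracted to a plain list of frequencies
def greedyL (k : Int) : List Int → Int → Int → Int
  | [], _, cnt => cnt
  | v :: rest, tmp, cnt => if tmp + v ≥ k then cnt + 1 else greedyL k rest (tmp + v) (cnt + 1)

lemma buildA_eq (t : List Int) : solA_build t = PySem.Dict.counter t := by
  unfold solA_build
  rw [← PySem.Dict.foldl_insert_getD_add_one_eq_counter]
  apply PySem.List.foldl_congr_mem
  intro acc x _
  by_cases h : acc.contains x = true
  · simp only [h, if_pos]
  · simp only [eq_false_of_ne_true h, if_neg, Bool.false_eq_true, not_false_iff]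
    rw [PySem.Dict.getD_insert_self, PySem.Dict.insert_insert_self,
        PySem.Dict.getD_of_not_contains _ _ (eq_false_of_ne_true h)]

lemma loopA_eq (k : Int) (l : List (Int × Int)) (tmp cnt : Int) :
    solA_loop k l tmp cnt = greedyL k (l.map (·.2)) tmp cnt := by
  induction l generalizing tmp cnt with
  | nil => rfl
  | cons p rest ih =>
      simp only [solA_loop, greedyL, List.map_cons]
      split_ifs with h
      · rfl
      · exact ih _ _

lemma inner_spec (k f : Int) (m : Nat) (tmp cnt : Int) (rest : List Int) :
    (match solB_inner k f m tmp cnt with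
     | Sum.inr r => r
     | Sum.inl (t', c') => greedyL k rest t' c')
    = greedyL k (List.replicate m f ++ rest) tmp cnt := by
  induction m generalizing tmp cnt with
  | zero => rfl
  | succ m ih =>
      simp only [solB_inner, List.replicate_succ, List.cons_append, greedyL]
      split_ifs with h
      · rfl
      · exact ih _ _

lemma outer_eq (k : Int) (bucket : List Int) (fs : List Int) (tmp cnt : Int) :
    solB_outer k bucket fs tmp cnt
      = greedyL k (fs.flatMap (fun f => List.replicate (bucket.getD f.toNat 0).toNat f)) tmp cnt := by
  induction fs generalizing tmp cnt with
  | nil => rfl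
  | cons f fs ih =>
      rw [List.flatMap_cons, ← inner_spec k f ((bucket.getD f.toNat 0).toNat) tmp cnt]
      simp only [solB_outer]
      cases h : solB_inner k f (bucket.getD f.toNat 0).toNat tmp cnt with
      | inr r => rfl
      | inl p => cases p; simp only [ih]

lemma getD_set_int (l : List Int) (i j : Nat) (a d : Int) (h : i < l.length) :
    (l.set i a).getD j d = if i = j then a else l.getD j d := by
  rw [List.getD_eq_getElem?_getD, List.getElem?_set]
  by_cases h1 : i = j
  · subst h1; simp [h]
  · simp [h1, List.getD_eq_getElem?_getD]

lemma bucket_spec (vs : List Int) (b : List Int)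
    (hv : ∀ v ∈ vs, 0 ≤ v ∧ v.toNat < b.length) (j : Nat) (hj : j < b.length) :
    (vs.foldl (fun (b : List Int) (f : Int) => b.set f.toNat (b.getD f.toNat 0 + 1)) b).getD j 0
      = b.getD j 0 + (vs.count (j : Int) : Int) := by
  induction vs generalizing b with
  | nil => simp
  | cons v vs ih =>
      simp only [List.foldl_cons]
      rw [ih _ (by intro x hx; simpa [List.length_set] using hv x (List.mem_cons_of_mem _ hx))
            (by simpa [List.length_set] using hj)]
      obtain ⟨hv0, hvl⟩ := hv v (List.mem_cons_self)
      rw [getD_set_int _ _ _ _ _ hvl, List.count_cons]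
      by_cases he : v.toNat = j
      · have : v = (j : Int) := by omega
        simp [this]
        ring
      · have : ¬ (v = (j : Int)) := by omega
        simp [he, this]

lemma count_flatMap_replicate (fs : List Int) (c : Int → Nat) (hnd : fs.Nodup) (a : Int) :
    (fs.flatMap (fun f => List.replicate (c f) f)).count a = if a ∈ fs then c a else 0 := by
  induction fs with
  | nil => simp
  | cons f fs ih =>
      simp only [List.flatMap_cons, List.count_append, List.count_replicate]
      rw [ih hnd.of_cons]
      rcases List.nodup_cons.mp hnd with ⟨hf, _⟩
      by_cases he : a = f
      · subst he; simp [hf]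
      · simp [he, Ne.symm he, List.mem_cons]

lemma pairwise_flatMap_replicate (fs : List Int) (c : Int → Nat)
    (h : fs.Pairwise (fun a b => b < a)) :
    (fs.flatMap (fun f => List.replicate (c f) f)).Pairwise (fun a b => b ≤ a) := by
  induction fs with
  | nil => simp
  | cons f fs ih =>
      simp only [List.flatMap_cons]
      rw [List.pairwise_append]
      refine ⟨List.pairwise_replicate.mpr (by omega), ih h.of_cons, ?_⟩
      intro x hx y hy
      have hxf : x = f := (List.eq_of_mem_replicate hx)
      rcases List.mem_flatMap.mp hy with ⟨g, hg, hyg⟩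
      have hyg' : y = g := List.eq_of_mem_replicate hyg
      have := (List.pairwise_cons.mp h).1 g hg
      omega

-- the values of the counter are the multiplicities: each lies in [1, n]
lemma counter_values_bound (t : List Int) :
    ∀ v ∈ (PySem.Dict.counter t).values, 1 ≤ v ∧ v ≤ (t.length : Int) := by
  intro v hv
  have : (PySem.Dict.counter t).values
      = (PySem.Set.ofList t).map (fun k => ((t.count k : Nat) : Int)) := by
    show ((PySem.Dict.counter t).items).map (·.2) = _
    rw [PySem.Dict.items_counter]
    simp
  rw [this] at hv
  rcases List.mem_map.mp hv with ⟨x, hx, rfl⟩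
  have hxm : x ∈ t := (PySem.Set.mem_ofList t x).mp hx
  have h1 : 1 ≤ t.count x := List.count_pos_iff.mpr hxm
  have h2 : t.count x ≤ t.length := List.count_le_length
  omega

-- descending range n, n-1, …, 1
lemma descList_eq (n : Nat) :
    PySem.List.pyRange (n : Int) 0 (-1) = (List.range n).map (fun (k : Nat) => (n : Int) - (k : Int)) := by
  have h0 : ((n : Int) - 0).toNat = n := by omega
  rw [PySem.List.pyRange_neg_one, h0]

lemma mem_descList (n : Nat) (x : Int) :
    x ∈ PySem.List.pyRange (n : Int) 0 (-1) ↔ 1 ≤ x ∧ x ≤ (n : Int) := by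
  rw [descList_eq]
  constructor
  · intro hx
    rcases List.mem_map.mp hx with ⟨j, hj, rfl⟩
    have := List.mem_range.mp hj
    omega
  · intro ⟨h1, h2⟩
    refine List.mem_map.mpr ⟨(n : Int).toNat - x.toNat, List.mem_range.mpr (by omega), by omega⟩

lemma pairwise_descList (n : Nat) :
    (PySem.List.pyRange (n : Int) 0 (-1)).Pairwise (fun a b => b < a) := by
  rw [descList_eq]
  rw [List.pairwise_map]
  have := List.pairwise_lt_range (n := n)
  refine this.imp ?_
  intro a b hab
  omega

lemma nodup_descList (n : Nat) : (PySem.List.pyRange (n : Int) 0 (-1)).Nodup :=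
  (pairwise_descList n).imp (by intro a b h; omega)

-- ===== the main list identity =====
lemma lists_eq (t : List Int) :
    ((PySem.List.sorted (PySem.Dict.counter t).items (fun item => item.2) true).map (·.2))
      = (PySem.List.pyRange (t.length : Int) 0 (-1)).flatMap
          (fun f => List.replicate ((PySem.Dict.counter t).values.count f) f) := by
  set vals := (PySem.Dict.counter t).values with hvals
  set LA := ((PySem.List.sorted (PySem.Dict.counter t).items (fun item => item.2) true).map (·.2)) with hLA
  set LB := (PySem.List.pyRange (t.length : Int) 0 (-1)).flatMap
          (fun f => List.replicate (vals.count f) f) with hLB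
  have hpermA : LA.Perm vals := by
    have h := PySem.List.sorted_perm (PySem.Dict.counter t).items (fun item => item.2) true
    have hv2 : vals = (PySem.Dict.counter t).items.map (fun item => item.2) := rfl
    rw [hLA, hv2]
    exact h.map _
  have hpermB : LB.Perm vals := by
    rw [List.perm_iff_count]
    intro a
    rw [hLB, count_flatMap_replicate _ _ (nodup_descList _) a]
    by_cases hm : a ∈ PySem.List.pyRange (t.length : Int) 0 (-1)
    · simp [hm]
    · simp only [hm, if_false]
      symm
      rw [List.count_eq_zero]
      intro hav
      exact hm ((mem_descList _ _).mpr (counter_values_bound t a hav))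
  have hsA : LA.Pairwise (fun a b => b ≤ a) := by
    rw [hLA, List.pairwise_map]
    exact PySem.List.sorted_pairwise_rev _ _
  have hsB : LB.Pairwise (fun a b => b ≤ a) :=
    pairwise_flatMap_replicate _ _ (pairwise_descList _)
  exact (hpermA.trans hpermB.symm).eq_of_pairwise (fun a b _ _ h1 h2 => by omega) hsA hsB


-- ===== VERDICT (by name: the statement is the Claim_ definition above) =====

theorem solution_spec : Claim_equal_solution := by
  intro k t _
  unfold Spec_solution solution solution_alt
  simp only [buildA_eq, loopA_eq, outer_eq, PySem.Dict.foldl_insert_getD_add_one_eq_counter]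
  rw [lists_eq]
  congr 1
  apply List.flatMap_congr
  intro f hf
  obtain ⟨hf1, hf2⟩ := (mem_descList t.length f).mp hf
  have hv : ∀ v ∈ (PySem.Dict.counter t).values, 0 ≤ v ∧
      v.toNat < (List.replicate (t.length + 1) (0 : Int)).length := by
    intro v hvm
    have := counter_values_bound t v hvm
    simp only [List.length_replicate]
    omega
  rw [bucket_spec _ _ hv f.toNat (by simp; omega),
      List.getD_replicate 0 (by simp; omega : f.toNat < t.length + 1)]
  have hcast : ((f.toNat : Nat) : Int) = f := by omega
  rw [hcast]
  simp
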